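-- pv_equiv track=rewrite | github.com/nkhoit/spire-archive | parsers/monster_parser.py | mode_for_pos
-- ===== SOURCE A (Python) =====
-- def mode_for_pos(pos: int, intervals) -> str:
--     chosen = None
--     chosen_len = None
--     for start, end, mode in intervals:
--         if start <= pos <= end:
--             length = end - start
--             if chosen is None or length < chosen_len:
--                 chosen = mode
--                 chosen_len = length
--     return chosen or "both"
-- ===== SOURCE B (Python) =====
-- def mode_for_pos(pos: int, intervals) -> str:
--     # Sort intervals by length ascending (stable: ties keep original order),
--     # then return the mode of the first sorted interval containing pos.
--     for start, end, mode in sorted(intervals, key=lambda iv: iv[1] - iv[0]):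
--         if start <= pos <= end:
--             return mode or "both"
--     return "both"
-- ===== Notes on version B (the rewrite author's own statement) =====
-- stated objective: alternative
-- what changed: Replaces A's single-pass running-minimum (chosen/chosen_len state) by a sort-then-scan strategy: stable-sort the intervals by length ascending and return the mode of the first sorted interval containing pos; stability makes ties resolve to the earliest interval exactly as A does.
import Mathlib
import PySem

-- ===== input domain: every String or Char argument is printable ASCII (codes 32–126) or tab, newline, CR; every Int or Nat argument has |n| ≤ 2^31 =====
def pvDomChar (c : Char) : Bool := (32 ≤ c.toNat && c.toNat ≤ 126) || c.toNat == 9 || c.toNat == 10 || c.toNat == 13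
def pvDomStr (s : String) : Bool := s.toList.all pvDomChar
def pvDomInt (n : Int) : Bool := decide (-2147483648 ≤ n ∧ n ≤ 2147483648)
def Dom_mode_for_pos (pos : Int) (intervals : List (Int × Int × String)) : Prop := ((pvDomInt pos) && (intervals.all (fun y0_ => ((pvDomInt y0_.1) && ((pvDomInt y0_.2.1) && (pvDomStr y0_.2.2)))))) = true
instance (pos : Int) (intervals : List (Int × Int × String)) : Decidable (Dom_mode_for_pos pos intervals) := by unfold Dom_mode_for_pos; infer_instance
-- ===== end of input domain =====

-- B replaces A's single-pass running-minimum scan by a different strategy: stable-sort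
-- the intervals by length ascending, then return the mode of the first sorted interval
-- containing pos ("both" if none / falsy); same result by stability, not faster.

-- ===== PORT A =====
-- loop body of A; state = (chosen, chosen_len).  The `.getD 0` is unreachable:
-- in A, chosen_len is a value whenever chosen is (Python would read chosen_len there).
def pvStepA (pos : Int) (acc : Option String × Option Int) (iv : Int × Int × String) :
    Option String × Option Int :=
  if iv.1 ≤ pos ∧ pos ≤ iv.2.1 then
    let length := iv.2.1 - iv.1
    match acc with
    | (none, _) => (some iv.2.2, some length)
    | (some chosen, chosen_len) =>
      if length < chosen_len.getD 0 then (some iv.2.2, some length)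
      else (some chosen, chosen_len)
  else acc

def mode_for_pos (pos : Int) (intervals : List (Int × Int × String)) : String :=
  let st := intervals.foldl (pvStepA pos) (none, none)
  -- `return chosen or "both"`
  match st.1 with
  | none => "both"
  | some chosen => if chosen = "" then "both" else chosen

-- ===== PORT B =====
-- Source B's `key=lambda iv: iv[1] - iv[0]`, named
def pvKey (iv : Int × Int × String) : Int := iv.2.1 - iv.1

-- the loop's `if start <= pos <= end` test
def pvContains (pos : Int) (iv : Int × Int × String) : Bool :=
  decide (iv.1 ≤ pos) && decide (pos ≤ iv.2.1)

-- `for … in sorted(intervals, key=…): if …: return mode or "both"` = find? on the sorted list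
def mode_for_pos_alt (pos : Int) (intervals : List (Int × Int × String)) : String :=
  match (PySem.List.sorted intervals pvKey).find? (pvContains pos) with
  | some iv => if iv.2.2 = "" then "both" else iv.2.2
  | none => "both"

-- ===== PRECONDITION & SPEC =====
def Spec_mode_for_pos (pos : Int) (intervals : List (Int × Int × String)) (out : String) : Prop := out = mode_for_pos_alt pos intervals
instance (pos : Int) (intervals : List (Int × Int × String)) (out : String) : Decidable (Spec_mode_for_pos pos intervals out) := by unfold Spec_mode_for_pos; infer_instance

-- ===== CLAIM (what is proved, stated in full; the proofs are below) =====
def Claim_equal_mode_for_pos : Prop := ∀ (pos : Int) (intervals : List (Int × Int × String)), Dom_mode_for_pos pos intervals → Spec_mode_for_pos pos intervals (mode_for_pos pos intervals)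

-- ===== LEMMAS AND PROOFS =====

-- the insertion step PySem's stable sort performs, at B's key
def pvIns (x : Int × Int × String) (acc : List (Int × Int × String)) : List (Int × Int × String) :=
  PySem.List.insertBy (fun a b => decide (pvKey a < pvKey b)) x acc

-- abstract running "first interval of minimal length containing pos" (what A's loop tracks)
def pvStepM (pos : Int) (m : Option (Int × Int × String)) (x : Int × Int × String) :
    Option (Int × Int × String) :=
  if pvContains pos x then
    match m with
    | none => some x
    | some c => if pvKey x < pvKey c then some x else some c
  else m

-- stability: inserting one element commutes find? with the running-min step,
-- provided the accumulator is already key-ordered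
lemma pvFindInsert (pos : Int) (x : Int × Int × String) (acc : List (Int × Int × String))
    (h : acc.Pairwise (fun a b => pvKey a ≤ pvKey b)) :
    (pvIns x acc).find? (pvContains pos) = pvStepM pos (acc.find? (pvContains pos)) x := by
  induction acc with
  | nil =>
    by_cases hx : pvContains pos x = true <;> simp [pvIns, PySem.List.insertBy, pvStepM, hx]
  | cons y ys ih =>
    rw [List.pairwise_cons] at h
    obtain ⟨hy, hys⟩ := h
    by_cases hlt : pvKey x < pvKey y
    · have : pvIns x (y :: ys) = x :: y :: ys := by
        simp [pvIns, PySem.List.insertBy, hlt]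
      rw [this]
      by_cases hx : pvContains pos x = true
      · rw [List.find?_cons_of_pos hx]
        simp only [pvStepM, hx, if_true]
        cases hm : (y :: ys).find? (pvContains pos) with
        | none => rfl
        | some m =>
          have hmem := List.mem_of_find?_eq_some hm
          have : pvKey x < pvKey m := by
            rcases List.mem_cons.mp hmem with rfl | hmem'
            · exact hlt
            · exact lt_of_lt_of_le hlt (hy m hmem')
          simp [this]
      · rw [List.find?_cons_of_neg (by simpa using hx)]
        simp [pvStepM, hx]
    · have : pvIns x (y :: ys) = y :: pvIns x ys := by
        simp [pvIns, PySem.List.insertBy, hlt]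
      rw [this]
      by_cases hyp : pvContains pos y = true
      · rw [List.find?_cons_of_pos hyp, List.find?_cons_of_pos hyp]
        simp [pvStepM, hlt]
      · rw [List.find?_cons_of_neg (by simpa using hyp),
            List.find?_cons_of_neg (by simpa using hyp)]
        exact ih hys

-- inserting preserves key-order of the accumulator
lemma pvInsPairwise (x : Int × Int × String) (acc : List (Int × Int × String))
    (h : acc.Pairwise (fun a b => pvKey a ≤ pvKey b)) :
    (pvIns x acc).Pairwise (fun a b => pvKey a ≤ pvKey b) := by
  induction acc with
  | nil => simp [pvIns, PySem.List.insertBy]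
  | cons y ys ih =>
    rw [List.pairwise_cons] at h
    obtain ⟨hy, hys⟩ := h
    by_cases hlt : pvKey x < pvKey y
    · have : pvIns x (y :: ys) = x :: y :: ys := by
        simp [pvIns, PySem.List.insertBy, hlt]
      rw [this, List.pairwise_cons]
      refine ⟨?_, List.pairwise_cons.mpr ⟨hy, hys⟩⟩
      intro a ha
      rcases List.mem_cons.mp ha with rfl | ha'
      · exact le_of_lt hlt
      · exact le_of_lt (lt_of_lt_of_le hlt (hy a ha'))
    · have : pvIns x (y :: ys) = y :: pvIns x ys := by
        simp [pvIns, PySem.List.insertBy, hlt]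
      rw [this, List.pairwise_cons]
      refine ⟨?_, ih hys⟩
      intro a ha
      have := (PySem.List.mem_insertBy (before := fun a b => decide (pvKey a < pvKey b))
        (x := x) (ys := ys) (y := a)).mp (by simpa [pvIns] using ha)
      rcases this with rfl | ha'
      · exact le_of_not_gt hlt
      · exact hy a ha'

-- the whole insertion-sort fold: find? over the growing sorted accumulator
-- is the running first-minimum over the unsorted suffix
lemma pvFoldSort (pos : Int) (xs : List (Int × Int × String)) (acc : List (Int × Int × String))
    (h : acc.Pairwise (fun a b => pvKey a ≤ pvKey b)) :
    (xs.foldl (fun a x => pvIns x a) acc).find? (pvContains pos)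
      = xs.foldl (pvStepM pos) (acc.find? (pvContains pos)) := by
  induction xs generalizing acc with
  | nil => rfl
  | cons x xs ih =>
    simp only [List.foldl_cons]
    rw [ih (pvIns x acc) (pvInsPairwise x acc h), pvFindInsert pos x acc h]

-- A's pair state encodes the running minimal interval
def pvEnc : Option (Int × Int × String) → Option String × Option Int
  | none => (none, none)
  | some iv => (some iv.2.2, some (pvKey iv))

lemma pvStepAEnc (pos : Int) (o : Option (Int × Int × String)) (x : Int × Int × String) :
    pvStepA pos (pvEnc o) x = pvEnc (pvStepM pos o x) := by
  by_cases hx : x.1 ≤ pos ∧ pos ≤ x.2.1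
  · have hc : pvContains pos x = true := by simp [pvContains, hx.1, hx.2]
    cases o with
    | none => simp [pvStepA, pvEnc, pvStepM, hx, hc, pvKey]
    | some c =>
      by_cases hl : pvKey x < pvKey c <;>
        [skip; skip] <;> simp only [pvKey] at hl <;>
        simp [pvStepA, pvEnc, pvStepM, hx, hc, pvKey, hl]
  · have hc : pvContains pos x = false := by
      simp only [pvContains]
      rcases not_and_or.mp hx with h | h <;> simp [h]
    simp [pvStepA, pvEnc, pvStepM, hx, hc]

lemma pvFoldA (pos : Int) (xs : List (Int × Int × String)) (o : Option (Int × Int × String)) :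
    xs.foldl (pvStepA pos) (pvEnc o) = pvEnc (xs.foldl (pvStepM pos) o) := by
  induction xs generalizing o with
  | nil => rfl
  | cons x xs ih => rw [List.foldl_cons, pvStepAEnc, ih, List.foldl_cons]

-- ===== VERDICT (by name: the statement is the Claim_ definition above) =====
theorem mode_for_pos_spec : Claim_equal_mode_for_pos := by
  intro pos intervals _
  unfold Spec_mode_for_pos mode_for_pos mode_for_pos_alt
  rw [PySem.List.sorted_eq_foldl_insertBy]
  have hsort := pvFoldSort pos intervals [] (by simp)
  simp only [List.find?_nil] at hsort
  have ha := pvFoldA pos intervals none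
  simp only [pvEnc] at ha
  simp only [pvIns] at hsort
  rw [hsort, ha]
  cases intervals.foldl (pvStepM pos) none with
  | none => rfl
  | some iv => rfl
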